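-- pv_equiv track=rewrite | github.com/SuperRonan/VkEngine | scripts/extractFormatsDetails.py | parseComponentsString
-- ===== SOURCE A (Python) =====
-- def parseDecNumber(s : str, i : int) -> tuple[str, int]:
-- 	res = ""
--
-- 	while i < len(s) and ord(s[i]) >= ord('0') and ord(s[i]) <= ord('9'):
-- 		res += s[i]
-- 		i = i + 1
--
-- 	return (res, i)
--
-- def parseComponentsString(comps : str) -> list[tuple[str, int]]:
-- 	res = []
--
-- 	i = 0
-- 	while i < len(comps):
-- 		channel_name = comps[i]
-- 		i = i + 1
-- 		channel_count, i = parseDecNumber(comps, i)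
-- 		channel_count = int(channel_count)
-- 		res.append((channel_name, channel_count))
--
-- 	return res
-- ===== SOURCE B (Python) =====
-- def parseComponentsString(comps : str) -> list[tuple[str, int]]:
-- 	# Two phases: fold the characters into (name, digit-run) tokens (a digit extends the
-- 	# latest token, anything else opens a new one), then convert the digit runs with int().
-- 	toks = []
-- 	for ch in comps:
-- 		if toks and '0' <= ch <= '9':
-- 			name, digits = toks[-1]
-- 			toks[-1] = (name, digits + ch)
-- 		else:
-- 			toks.append((ch, ""))
-- 	return [(name, int(digits)) for name, digits in toks]
-- ===== Notes on version B (the rewrite author's own statement) =====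
-- stated objective: simpler
-- what changed: A's indexed while-loop with the parseDecNumber digit-scanning helper is replaced by two phases: one flat fold that grows (name, digit-run) tokens (a digit extends the latest token) and a comprehension converting the runs with int().
import Mathlib
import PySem

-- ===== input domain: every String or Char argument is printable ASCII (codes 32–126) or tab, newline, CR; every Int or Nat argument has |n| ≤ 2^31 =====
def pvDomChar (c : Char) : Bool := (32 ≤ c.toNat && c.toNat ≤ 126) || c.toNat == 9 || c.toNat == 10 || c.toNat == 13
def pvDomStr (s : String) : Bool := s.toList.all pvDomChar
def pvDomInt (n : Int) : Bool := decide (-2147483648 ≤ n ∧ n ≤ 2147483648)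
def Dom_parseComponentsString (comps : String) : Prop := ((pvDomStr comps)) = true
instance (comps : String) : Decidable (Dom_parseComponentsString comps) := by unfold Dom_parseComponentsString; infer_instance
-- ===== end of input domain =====

-- B replaces A's indexed while-loop + parseDecNumber helper by a flat fold into (name, digit-run)
-- tokens followed by an int() conversion pass; objective: simpler.


-- ===== PORT A =====
-- ord('0') <= ord(c) <= ord('9')
def pvIsDig (c : Char) : Bool := 48 ≤ c.toNat && c.toNat ≤ 57

-- parseDecNumber's while loop, as structural recursion on the remaining suffix of the string
-- (i advancing over s ↔ consuming the suffix): returns (digits collected, remaining suffix).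
def pvParseDecNumber : List Char → List Char × List Char
  | [] => ([], [])
  | c :: rest =>
    if pvIsDig c then
      let p := pvParseDecNumber rest
      (c :: p.1, p.2)
    else ([], c :: rest)

theorem pvParseDecNumber_len (cs : List Char) : (pvParseDecNumber cs).2.length ≤ cs.length := by
  induction cs with
  | nil => simp [pvParseDecNumber]
  | cons c rest ih =>
    simp only [pvParseDecNumber]
    split
    · simpa using Nat.le_succ_of_le ih
    · simp

-- int(res) for a nonempty all-digit string: exact there (int('') raises ValueError — in both
-- Pythons — exactly on the inputs Pre_parseComponentsString excludes).
def pvIntOfDigits (ds : List Char) : Int :=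
  ds.foldl (fun a c => a * 10 + ((c.toNat : Int) - 48)) 0

-- A's outer while loop over comps
def pvGoA : List Char → List (String × Int)
  | [] => []
  | c :: rest =>
    let p := pvParseDecNumber rest
    (String.ofList [c], pvIntOfDigits p.1) :: pvGoA p.2
termination_by cs => cs.length
decreasing_by
  have := pvParseDecNumber_len rest
  simp only [List.length_cons]
  omega

def parseComponentsString (comps : String) : List (String × Int) := pvGoA comps.toList

-- ===== PORT B =====
-- B's loop body: a digit extends the latest token's digit run, anything else appends a new token.
def pvStepB (toks : List (String × List Char)) (ch : Char) : List (String × List Char) :=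
  match toks.getLast?, pvIsDig ch with
  | some (name, digits), true => toks.dropLast ++ [(name, digits ++ [ch])]
  | _, _ => toks ++ [(String.ofList [ch], [])]

-- B: fold into tokens, then the conversion comprehension (int(digits), exact under Pre_).
def parseComponentsString_alt (comps : String) : List (String × Int) :=
  (comps.toList.foldl pvStepB []).map (fun t => (t.1, pvIntOfDigits t.2))

-- ===== PRECONDITION & SPEC =====
-- DFA for the regular language ((.)[0-9]+)* : exactly the strings on which int('') never
-- raises, i.e. every channel name is followed by at least one ASCII digit (both Pythons
-- raise ValueError on the excluded inputs).
-- st = 0: start; st = 1: just read a name, a digit is required; st = 2: inside a digit run.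
def pvTokOk : List Char → Nat → Bool
  | [], st => st ≠ 1
  | c :: rest, st =>
    if st = 0 then pvTokOk rest 1
    else if pvIsDig c then pvTokOk rest 2
    else if st = 2 then pvTokOk rest 1
    else false

def Pre_parseComponentsString (comps : String) : Prop := pvTokOk comps.toList 0 = true
instance (comps : String) : Decidable (Pre_parseComponentsString comps) := by
  unfold Pre_parseComponentsString; infer_instance

def pvWitness_parseComponentsString : String := "r8g8b8a8"

def Spec_parseComponentsString (comps : String) (out : List (String × Int)) : Prop := out = parseComponentsString_alt comps
instance (comps : String) (out : List (String × Int)) : Decidable (Spec_parseComponentsString comps out) := by unfold Spec_parseComponentsString; infer_instance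

-- ===== CLAIM (what is proved, stated in full; the proofs are below) =====
def Claim_equal_parseComponentsString : Prop := ∀ (comps : String), Dom_parseComponentsString comps → Pre_parseComponentsString comps → Spec_parseComponentsString comps (parseComponentsString comps)

-- ===== LEMMAS AND PROOFS =====

theorem pvGoA_nil : pvGoA [] = [] := by rw [pvGoA]

theorem pvGoA_cons (c : Char) (rest : List Char) :
    pvGoA (c :: rest)
      = (String.ofList [c], pvIntOfDigits (pvParseDecNumber rest).1) :: pvGoA (pvParseDecNumber rest).2 := by
  rw [pvGoA]

-- proof-side token list: what B's fold produces, in A's recursion shape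
def pvToks : List Char → List (String × List Char)
  | [] => []
  | c :: rest =>
    let p := pvParseDecNumber rest
    (String.ofList [c], p.1) :: pvToks p.2
termination_by cs => cs.length
decreasing_by
  have := pvParseDecNumber_len rest
  simp only [List.length_cons]
  omega

theorem pvToks_nil : pvToks [] = [] := by rw [pvToks]

theorem pvToks_cons (c : Char) (rest : List Char) :
    pvToks (c :: rest)
      = (String.ofList [c], (pvParseDecNumber rest).1) :: pvToks (pvParseDecNumber rest).2 := by
  rw [pvToks]

-- B's fold, started with a nonempty token list, finishes the open token with the coming digit
-- run and then tokenizes the remainder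
theorem pvFoldB_concat (cs : List Char) :
    ∀ (toks : List (String × List Char)) (n : String) (d : List Char),
      List.foldl pvStepB (toks ++ [(n, d)]) cs
        = toks ++ (n, d ++ (pvParseDecNumber cs).1) :: pvToks (pvParseDecNumber cs).2 := by
  induction cs with
  | nil => intro toks n d; simp [pvParseDecNumber, pvToks_nil]
  | cons c rest ih =>
    intro toks n d
    cases hd : pvIsDig c with
    | true =>
      have hstep : pvStepB (toks ++ [(n, d)]) c = toks ++ [(n, d ++ [c])] := by
        simp [pvStepB, hd]
      simp only [List.foldl_cons, hstep, ih, pvParseDecNumber, hd, if_pos]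
      simp
    | false =>
      have hstep : pvStepB (toks ++ [(n, d)]) c
          = (toks ++ [(n, d)]) ++ [(String.ofList [c], [])] := by
        simp [pvStepB, hd]
      simp only [List.foldl_cons, hstep, ih, pvParseDecNumber, hd]
      simp [pvToks_cons]

theorem pvFoldB_eq_pvToks (cs : List Char) : List.foldl pvStepB [] cs = pvToks cs := by
  cases cs with
  | nil => simp [pvToks_nil]
  | cons c rest =>
    have hstep : pvStepB [] c = [(String.ofList [c], [])] := by
      cases hd : pvIsDig c <;> simp [pvStepB, hd]
    have := pvFoldB_concat rest [] (String.ofList [c]) []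
    simp only [List.foldl_cons, hstep]
    simpa [pvToks_cons] using this

theorem pvGoA_eq_map_pvToks (cs : List Char) :
    pvGoA cs = (pvToks cs).map (fun t => (t.1, pvIntOfDigits t.2)) := by
  induction hn : cs.length using Nat.strong_induction_on generalizing cs with
  | _ k ih =>
    cases cs with
    | nil => simp [pvGoA_nil, pvToks_nil]
    | cons c rest =>
      have hlen : (pvParseDecNumber rest).2.length < k := by
        have := pvParseDecNumber_len rest
        simp only [List.length_cons] at hn
        omega
      rw [pvGoA_cons, pvToks_cons, List.map_cons,
        ih _ hlen (pvParseDecNumber rest).2 rfl]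

-- ===== VERDICT (by name: the statement is the Claim_ definition above) =====
theorem parseComponentsString_spec : Claim_equal_parseComponentsString := by
  intro comps _ _
  unfold Spec_parseComponentsString parseComponentsString parseComponentsString_alt
  rw [pvFoldB_eq_pvToks, pvGoA_eq_map_pvToks]
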